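-- pv_equiv track=rewrite | github.com/justoneguy01/Advent_of_Code_Python | 2017/Day_1/Day_1_Inverse Captcha.py | solve
-- ===== SOURCE A (Python) =====
-- def solve(num_STR):
--     answer=0
--     for i in range(0,len(num_STR)):
--         if i!=len(num_STR)-1 and num_STR[i]==num_STR[i+1]:
--             answer=answer+int(num_STR[i])
--         elif i==len(num_STR)-1 and num_STR[i]==num_STR[0]:
--             answer=answer+int(num_STR[i])
--     return answer
-- ===== SOURCE B (Python) =====
-- def solve(num_STR):
--     # Run-length encode the string, then sum (run_length - 1) * digit per run
--     # (covers all linear adjacent equal pairs) and add the wraparound digit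
--     # once if the string ends with the same character it starts with.
--     def rle(s):
--         if not s:
--             return []
--         ch = s[0]
--         k = 1
--         while k < len(s) and s[k] == ch:
--             k += 1
--         return [(ch, k)] + rle(s[k:])
--
--     total = sum((k - 1) * int(ch) for ch, k in rle(num_STR) if k > 1)
--     if num_STR and num_STR[-1] == num_STR[0]:
--         total += int(num_STR[-1])
--     return total
-- ===== Notes on version B (the rewrite author's own statement) =====
-- stated objective: alternative
-- what changed: Replaces the per-index loop with its two positional branches by a run-length encoding: recursively split the string into maximal runs of equal characters, sum (run_length-1)*digit per run, and add the wraparound digit once when the last character equals the first.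
import Mathlib
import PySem

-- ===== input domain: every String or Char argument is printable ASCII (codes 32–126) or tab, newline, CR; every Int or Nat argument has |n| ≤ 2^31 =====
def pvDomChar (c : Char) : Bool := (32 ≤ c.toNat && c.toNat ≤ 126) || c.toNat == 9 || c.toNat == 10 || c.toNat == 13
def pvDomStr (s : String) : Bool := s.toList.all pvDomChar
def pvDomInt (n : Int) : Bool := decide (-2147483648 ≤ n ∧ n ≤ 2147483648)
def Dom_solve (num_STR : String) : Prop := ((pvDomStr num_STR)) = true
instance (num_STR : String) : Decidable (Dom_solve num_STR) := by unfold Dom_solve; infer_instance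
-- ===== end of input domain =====

-- B replaces the indexed loop by a recursive run-length encoding (sum (k-1)*digit per run, plus one wraparound term); objective: alternative.


-- ===== PORT A =====
-- int(c) for the one-character string c; exact wherever Python returns (Pre_solve guarantees c is a digit there)
def pyIntChar (c : Char) : Int := (PySem.Int.ofChars? [c]).getD 0

def solve (num_STR : String) : Int :=
  let l := num_STR.toList
  let n : Int := PySem.List.len l
  (PySem.List.pyRange 0 n 1).foldl (fun answer i =>
    if i ≠ n - 1 ∧ PySem.List.pyGetD l i ' ' = PySem.List.pyGetD l (i + 1) ' ' then
      answer + pyIntChar (PySem.List.pyGetD l i ' ')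
    else if i = n - 1 ∧ PySem.List.pyGetD l i ' ' = PySem.List.pyGetD l 0 ' ' then
      answer + pyIntChar (PySem.List.pyGetD l i ' ')
    else answer) 0

-- ===== PORT B =====
-- Source B's rle: the while loop counting how far s[0] repeats computes the length of the
-- matching prefix of the tail (takeWhile), and the recursive call on s[k:] is dropWhile.
def rleRuns : List Char → List (Char × Nat)
  | [] => []
  | ch :: t =>
    (ch, 1 + (t.takeWhile (fun c => c = ch)).length) :: rleRuns (t.dropWhile (fun c => c = ch))
termination_by l => l.length
decreasing_by
  simpa using Nat.lt_succ_of_le (t.length_dropWhile_le _)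

def solve_alt (num_STR : String) : Int :=
  let l := num_STR.toList
  let total := ((rleRuns l).map (fun p => if 1 < p.2 then ((p.2 : Int) - 1) * pyIntChar p.1 else 0)).sum
  if l ≠ [] ∧ PySem.List.pyGetD l (-1) ' ' = PySem.List.pyGetD l 0 ' ' then
    total + pyIntChar (PySem.List.pyGetD l (-1) ' ')
  else total

-- ===== PRECONDITION & SPEC =====
-- Pre_ excludes exactly the strings on which Python A raises ValueError: those where some
-- character equal to its circular successor is not a decimal digit (int() then fails).
def Pre_solve (num_STR : String) : Prop :=
  ∀ i : Nat, ∀ h : i < num_STR.toList.length,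
    num_STR.toList[i] =
      num_STR.toList[(i + 1) % num_STR.toList.length]'(Nat.mod_lt _ (by omega)) →
    num_STR.toList[i].isDigit
instance (num_STR : String) : Decidable (Pre_solve num_STR) := by unfold Pre_solve; infer_instance

def pvWitness_solve : String := "1122"

def Spec_solve (num_STR : String) (out : Int) : Prop := out = solve_alt num_STR
instance (num_STR : String) (out : Int) : Decidable (Spec_solve num_STR out) := by unfold Spec_solve; infer_instance

-- ===== CLAIM (what is proved, stated in full; the proofs are below) =====
def Claim_equal_solve : Prop := ∀ (num_STR : String), Dom_solve num_STR → Pre_solve num_STR → Spec_solve num_STR (solve num_STR)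

-- ===== LEMMAS AND PROOFS =====

-- contribution of index k in A's loop
def pvContribA (l : List Char) (k : Nat) : Int :=
  if k ≠ l.length - 1 ∧ l.getD k ' ' = l.getD (k + 1) ' ' then pyIntChar (l.getD k ' ')
  else if k = l.length - 1 ∧ l.getD k ' ' = l.getD 0 ' ' then pyIntChar (l.getD k ' ')
  else 0

-- sum of the digits over linear adjacent equal pairs
def pvAdjSum : List Char → Int
  | a :: b :: t => (if a = b then pyIntChar a else 0) + pvAdjSum (b :: t)
  | _ => 0

theorem pv_adjSum_split (ch : Char) (t : List Char) :
    pvAdjSum (ch :: t) =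
      ((t.takeWhile (fun c => c = ch)).length : Int) * pyIntChar ch +
        pvAdjSum (t.dropWhile (fun c => c = ch)) := by
  induction t with
  | nil => simp [pvAdjSum]
  | cons b t' ih =>
    by_cases hb : b = ch
    · subst hb
      have htw : ((b :: t').takeWhile (fun c => c = b)) = b :: t'.takeWhile (fun c => c = b) := by
        simp
      have hdw : ((b :: t').dropWhile (fun c => c = b)) = t'.dropWhile (fun c => c = b) := by
        simp
      rw [show pvAdjSum (b :: b :: t') = pyIntChar b + pvAdjSum (b :: t') from by
        simp [pvAdjSum], ih, htw, hdw]
      simp only [List.length_cons]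
      push_cast
      ring
    · have htw : ((b :: t').takeWhile (fun c => c = ch)) = [] := by
        simp [hb]
      have hdw : ((b :: t').dropWhile (fun c => c = ch)) = b :: t' := by
        simp [hb]
      rw [show pvAdjSum (ch :: b :: t') = (if ch = b then pyIntChar ch else 0) + pvAdjSum (b :: t')
        from by simp [pvAdjSum], htw, hdw]
      rw [if_neg (fun h : ch = b => hb h.symm)]
      simp

-- the per-run sum of B equals the linear adjacent-pair sum
theorem pv_runs_eq_adjSum (l : List Char) :
    ((rleRuns l).map (fun p => if 1 < p.2 then ((p.2 : Int) - 1) * pyIntChar p.1 else 0)).sum =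
      pvAdjSum l := by
  induction l using rleRuns.induct with
  | case1 => simp [rleRuns, pvAdjSum]
  | case2 ch t ih =>
    rw [rleRuns]
    simp only [List.map_cons, List.sum_cons, ih]
    rw [pv_adjSum_split ch t]
    set m := (t.takeWhile (fun c => c = ch)).length with hm
    congr 1
    by_cases h1 : 1 < 1 + m
    · rw [if_pos h1]; push_cast; ring
    · have hm0 : m = 0 := by omega
      rw [if_neg h1, hm0]
      simp

-- A's per-index sum over the linear indices equals the adjacent-pair sum
theorem pv_lin_eq_adjSum (l : List Char) :
    ((List.range (l.length - 1)).map
        (fun i => if l.getD i ' ' = l.getD (i + 1) ' ' then pyIntChar (l.getD i ' ') else 0)).sum =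
      pvAdjSum l := by
  induction l with
  | nil => simp [pvAdjSum]
  | cons a t ih =>
    cases t with
    | nil => simp [pvAdjSum]
    | cons b t' =>
      have hlen : (a :: b :: t').length - 1 = t'.length + 1 := by simp
      rw [hlen, List.range_succ_eq_map, List.map_cons, List.sum_cons, List.map_map]
      have hshift :
          ((List.range t'.length).map
            ((fun i => if (a :: b :: t').getD i ' ' = (a :: b :: t').getD (i + 1) ' ' then
                pyIntChar ((a :: b :: t').getD i ' ') else 0) ∘ Nat.succ)) =
          ((List.range ((b :: t').length - 1)).map
            (fun i => if (b :: t').getD i ' ' = (b :: t').getD (i + 1) ' ' then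
                pyIntChar ((b :: t').getD i ' ') else 0)) := by
        simp [Function.comp_def]
      rw [hshift, ih]
      simp [pvAdjSum, List.getD_cons_succ]

-- A's whole range sum: linear part + wraparound term
theorem pv_range_sum (l : List Char) :
    ((List.range l.length).map (pvContribA l)).sum =
      pvAdjSum l +
        (if l ≠ [] ∧ l.getD (l.length - 1) ' ' = l.getD 0 ' ' then
            pyIntChar (l.getD (l.length - 1) ' ') else 0) := by
  cases l with
  | nil => simp [pvAdjSum]
  | cons a t =>
    have hn : (a :: t).length = t.length + 1 := by simp
    rw [hn, List.range_succ, List.map_append, List.sum_append]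
    have hlast : pvContribA (a :: t) t.length =
        (if (a :: t).getD t.length ' ' = (a :: t).getD 0 ' ' then
            pyIntChar ((a :: t).getD t.length ' ') else 0) := by
      unfold pvContribA
      rw [hn]
      simp
    have hlin : ∀ i ∈ List.range t.length, pvContribA (a :: t) i =
        (if (a :: t).getD i ' ' = (a :: t).getD (i + 1) ' ' then
            pyIntChar ((a :: t).getD i ' ') else 0) := by
      intro i hi
      have hil : i < t.length := List.mem_range.mp hi
      unfold pvContribA
      rw [hn]
      by_cases hc : (a :: t).getD i ' ' = (a :: t).getD (i + 1) ' '
      · rw [if_pos ⟨by omega, hc⟩]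
        rw [if_pos hc]
      · rw [if_neg (fun hh => hc hh.2), if_neg (fun hh => absurd hh.1 (by omega)), if_neg hc]
    rw [List.map_congr_left hlin]
    have h1 := pv_lin_eq_adjSum (a :: t)
    rw [show (a :: t).length - 1 = t.length from by simp] at h1
    rw [h1]
    simp only [List.map_cons, List.map_nil, List.sum_cons, List.sum_nil, add_zero, hlast]
    have hne : (a :: t) ≠ [] := by simp
    simp only [Nat.add_sub_cancel]
    split_ifs with h2 h3 h3
    · rfl
    · exact absurd ⟨hne, h2⟩ h3
    · exact absurd h3.2 h2
    · rfl

-- reduction of A's foldl to the mapped range sum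
theorem pv_foldA (l : List Char) :
    (PySem.List.pyRange 0 (PySem.List.len l) 1).foldl (fun answer i =>
      if i ≠ PySem.List.len l - 1 ∧ PySem.List.pyGetD l i ' ' = PySem.List.pyGetD l (i + 1) ' ' then
        answer + pyIntChar (PySem.List.pyGetD l i ' ')
      else if i = PySem.List.len l - 1 ∧ PySem.List.pyGetD l i ' ' = PySem.List.pyGetD l 0 ' ' then
        answer + pyIntChar (PySem.List.pyGetD l i ' ')
      else answer) 0 = ((List.range l.length).map (pvContribA l)).sum := by
  rw [PySem.List.len_eq, PySem.List.pyRange_zero_natCast, List.foldl_map]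
  rw [PySem.List.foldl_congr_mem _ _ (fun a k => a + pvContribA l k) 0 ?_]
  · rw [PySem.List.foldl_add, zero_add]
  · intro acc k hk
    have hklt : k < l.length := List.mem_range.mp hk
    have h1 : ((k : Int) + 1) = ((k + 1 : Nat) : Int) := by push_cast; ring
    unfold pvContribA
    rw [h1]
    simp only [PySem.List.pyGetD_natCast, PySem.List.pyGetD_zero]
    have h2 : ((k : Int) ≠ (l.length : Int) - 1) ↔ (k ≠ l.length - 1) := by omega
    by_cases hc1 : k ≠ l.length - 1 ∧ l.getD k ' ' = l.getD (k + 1) ' '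
    · rw [if_pos hc1, if_pos ⟨h2.mpr hc1.1, hc1.2⟩]
    · rw [if_neg hc1, if_neg (by rw [h2]; exact hc1)]
      by_cases hc2 : k = l.length - 1 ∧ l.getD k ' ' = l.getD 0 ' '
      · rw [if_pos hc2, if_pos ⟨by omega, hc2.2⟩]
      · rw [if_neg hc2, if_neg (by rw [show ((k:Int) = (l.length:Int) - 1) ↔ (k = l.length - 1) from by omega]; exact hc2), add_zero]

-- ===== VERDICT (by name: the statement is the Claim_ definition above) =====
theorem solve_spec : Claim_equal_solve := by
  intro s _ _
  unfold Spec_solve solve solve_alt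
  dsimp only
  rw [pv_foldA s.toList, pv_range_sum, pv_runs_eq_adjSum]
  cases hl : s.toList with
  | nil => simp
  | cons a t =>
    have hne : (a :: t) ≠ [] := by simp
    have hneg : PySem.List.pyGetD (a :: t) (-1) ' ' = (a :: t).getD ((a :: t).length - 1) ' ' := by
      rw [PySem.List.pyGetD_neg_ofNat (a :: t) 1 ' ' (by omega) (by simp),
        List.getD_eq_getElem _ _ (by simp)]
      rfl
    rw [hneg, PySem.List.pyGetD_zero]
    split_ifs with h1
    · rfl
    · exact add_zero _
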